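-- pv_equiv track=rewrite | github.com/dlwldnjs1009/coding-test | 백준/Silver/1074. Z/Z.py | z_order
-- ===== SOURCE A (Python) =====
-- def z_order(n, r, c):
--     if n == 0:
--         return 0
--     half = 1 << (n - 1)
--     # Z의 4등분 중 어디에 위치하는지 판단
--     if r < half and c < half:
--         return z_order(n - 1, r, c)
--     elif r < half and c >= half:
--         return half * half + z_order(n - 1, r, c - half)
--     elif r >= half and c < half:
--         return 2 * half * half + z_order(n - 1, r - half, c)
--     else:
--         return 3 * half * half + z_order(n - 1, r - half, c - half)
-- ===== SOURCE B (Python) =====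
-- def z_order(n, r, c):
--     result = 0
--     for i in range(n, 0, -1):
--         half = 1 << (i - 1)
--         q = 0
--         if r >= half:
--             q += 2
--             r -= half
--         if c >= half:
--             q += 1
--             c -= half
--         result += q * half * half
--     return result
-- ===== Notes on version B (the rewrite author's own statement) =====
-- stated objective: alternative
-- what changed: Replaces the quadrant recursion with an iterative accumulator loop over the levels n..1, mutating r,c and summing q*half*half at each level.
-- outside the precondition, e.g. on z_order(950, 0, 0): A returns 0, B returns 0
import Mathlib
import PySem

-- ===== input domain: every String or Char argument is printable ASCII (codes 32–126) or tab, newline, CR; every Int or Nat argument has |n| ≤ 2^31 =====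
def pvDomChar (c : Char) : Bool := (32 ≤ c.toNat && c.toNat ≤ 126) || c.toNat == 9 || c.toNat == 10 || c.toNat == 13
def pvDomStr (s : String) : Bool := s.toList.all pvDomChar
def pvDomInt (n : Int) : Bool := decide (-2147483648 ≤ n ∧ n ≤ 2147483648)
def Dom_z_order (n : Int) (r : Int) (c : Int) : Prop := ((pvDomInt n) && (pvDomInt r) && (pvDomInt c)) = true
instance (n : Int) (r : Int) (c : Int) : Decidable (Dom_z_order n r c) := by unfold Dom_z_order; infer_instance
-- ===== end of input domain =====

-- B replaces the quadrant recursion by an iterative accumulator loop over the levels; same O(n) cost, different decomposition.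

-- ===== PORT A =====
-- A recurses with n decreasing by 1 until 0; on the admitted inputs (Pre_: 0 ≤ n) this
-- is exactly structural recursion on n.toNat (1 << (n-1) is 2 ^ (n.toNat - 1)).
def zOrderRecA : Nat → Int → Int → Int
  | 0, _r, _c => 0
  | Nat.succ m, r, c =>
    let half : Int := 2 ^ m
    if r < half ∧ c < half then zOrderRecA m r c
    else if r < half ∧ c ≥ half then half * half + zOrderRecA m r (c - half)
    else if r ≥ half ∧ c < half then 2 * half * half + zOrderRecA m (r - half) c
    else 3 * half * half + zOrderRecA m (r - half) (c - half)

def z_order (n : Int) (r : Int) (c : Int) : Int := zOrderRecA n.toNat r c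

-- ===== PORT B =====
-- B's loop 'for i in range(n, 0, -1)' runs n.toNat times with the accumulator state (r, c, result).
def zOrderLoopB : Nat → Int → Int → Int → Int
  | 0, _r, _c, result => result
  | Nat.succ m, r, c, result =>
    let half : Int := 2 ^ m
    let q : Int := (if r ≥ half then 2 else 0) + (if c ≥ half then 1 else 0)
    let r' : Int := if r ≥ half then r - half else r
    let c' : Int := if c ≥ half then c - half else c
    zOrderLoopB m r' c' (result + q * half * half)

def z_order_alt (n : Int) (r : Int) (c : Int) : Int := zOrderLoopB n.toNat r c 0

-- ===== PRECONDITION & SPEC =====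
-- Pre_ excludes n < 0, where Python A raises ValueError (negative shift count), and large n,
-- where A's recursion exceeds Python's recursion limit (RecursionError from n = 998 at top level;
-- the 900 cap leaves a margin because the exact limit depends on the caller's stack depth).
def Pre_z_order (n : Int) (r : Int) (c : Int) : Prop := 0 ≤ n ∧ n ≤ 900
instance (n : Int) (r : Int) (c : Int) : Decidable (Pre_z_order n r c) := by unfold Pre_z_order; infer_instance
def pvWitness_z_order : Int × Int × Int := (3, 5, 6)

def Spec_z_order (n : Int) (r : Int) (c : Int) (out : Int) : Prop := out = z_order_alt n r c
instance (n : Int) (r : Int) (c : Int) (out : Int) : Decidable (Spec_z_order n r c out) := by unfold Spec_z_order; infer_instance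

-- ===== CLAIM (what is proved, stated in full; the proofs are below) =====
def Claim_equal_z_order : Prop := ∀ (n : Int) (r : Int) (c : Int), Dom_z_order n r c → Pre_z_order n r c → Spec_z_order n r c (z_order n r c)

-- ===== LEMMAS AND PROOFS =====
-- Loop invariant: the accumulator loop computes result + the recursive value.
theorem zOrderLoopB_eq (m : Nat) : ∀ (r c result : Int),
    zOrderLoopB m r c result = result + zOrderRecA m r c := by
  induction m with
  | zero => intro r c result; simp [zOrderLoopB, zOrderRecA]
  | succ k ih =>
    intro r c result
    simp only [zOrderLoopB, zOrderRecA]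
    by_cases hr : r ≥ (2 ^ k : Int) <;> by_cases hc : c ≥ (2 ^ k : Int) <;>
      simp [hr, hc, ih, not_le.mp, lt_iff_not_ge] <;> ring

-- ===== VERDICT (by name: the statement is the Claim_ definition above) =====
theorem z_order_spec : Claim_equal_z_order := by
  intro n r c _ _
  unfold Spec_z_order z_order z_order_alt
  simp [zOrderLoopB_eq]
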